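-- pv_equiv track=rewrite | github.com/l33tdawg/aether | core/finding_deduplicator.py | _select_best_type
-- ===== SOURCE A (Python) =====
-- from typing import List, Dict, Any, Set, Tuple, Optional
--
-- def _select_best_type(types: List[str]) -> str:
--     """Select the most specific/appropriate vulnerability type"""
--     # Preference order (more specific types)
--     preference = [
--         'initialization_frontrun_risk',
--         'unprotected_initialization',
--         'precision_loss_division',
--         'oracle_manipulation',
--         'unbounded_loop_dos',
--         'reentrancy_vulnerability',
--     ]
--
--     for preferred_type in preference:
--         if preferred_type in types:
--             return preferred_type
--
--     # If no preferred type, use the first one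
--     return types[0]
-- ===== SOURCE B (Python) =====
-- def _select_best_type(types):
--     """Select the most specific/appropriate vulnerability type"""
--     preference = [
--         'initialization_frontrun_risk',
--         'unprotected_initialization',
--         'precision_loss_division',
--         'oracle_manipulation',
--         'unbounded_loop_dos',
--         'reentrancy_vulnerability',
--     ]
--     rank = {t: i for i, t in enumerate(preference)}
--     n = len(preference)
--     best = types[0]
--     for t in types[1:]:
--         if rank.get(t, n) < rank.get(best, n):
--             best = t
--     return best
-- ===== Notes on version B (the rewrite author's own statement) =====
-- stated objective: alternative
-- what changed: B builds a rank dictionary from the preference list once and makes a single running-minimum pass over types (keeping the first element of minimal rank), instead of A's scan over the preference list with a membership test over types for each entry.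
import Mathlib
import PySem

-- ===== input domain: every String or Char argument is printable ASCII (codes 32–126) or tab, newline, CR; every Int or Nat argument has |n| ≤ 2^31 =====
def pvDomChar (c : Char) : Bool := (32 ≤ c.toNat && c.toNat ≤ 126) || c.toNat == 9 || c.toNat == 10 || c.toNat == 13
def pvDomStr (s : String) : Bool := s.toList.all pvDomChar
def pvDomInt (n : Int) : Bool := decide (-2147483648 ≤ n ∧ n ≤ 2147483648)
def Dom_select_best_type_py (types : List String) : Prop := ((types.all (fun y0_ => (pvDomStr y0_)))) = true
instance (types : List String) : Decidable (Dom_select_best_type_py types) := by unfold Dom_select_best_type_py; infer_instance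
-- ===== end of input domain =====

-- B replaces A's scan over the fixed preference list (membership test per entry) with a rank
-- dictionary built once and a single running-minimum pass over `types` (objective: alternative).


-- ===== PORT A =====
-- the fixed preference list of A (identical literal in B's port)
def pvPreference : List String :=
  [ "initialization_frontrun_risk"
  , "unprotected_initialization"
  , "precision_loss_division"
  , "oracle_manipulation"
  , "unbounded_loop_dos"
  , "reentrancy_vulnerability" ]

-- 'for preferred_type in preference: if preferred_type in types: return preferred_type'
def pvSelGoA (prefs : List String) (types : List String) : String :=
  match prefs with
  | [] => (PySem.List.pyGet? types 0).getD ""   -- 'return types[0]'; none (IndexError) excluded by Pre_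
  | p :: ps => if types.contains p then p else pvSelGoA ps types

def select_best_type_py (types : List String) : String :=
  pvSelGoA pvPreference types

-- ===== PORT B =====
def select_best_type_py_alt (types : List String) : String :=
  let preference := pvPreference
  -- rank = {t: i for i, t in enumerate(preference)}
  let rank : PySem.Dict String Int :=
    (PySem.List.enumerate preference).foldl (fun d p => d.insert p.2 p.1) PySem.Dict.empty
  let n : Int := (preference.length : Int)
  -- best = types[0]
  let best := (PySem.List.pyGet? types 0).getD ""   -- none (IndexError) excluded by Pre_
  -- for t in types[1:]: if rank.get(t, n) < rank.get(best, n): best = t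
  (PySem.List.slice types (some 1) none).foldl
    (fun best t => if rank.getD t n < rank.getD best n then t else best) best

-- ===== PRECONDITION & SPEC =====
-- both programs raise IndexError on the empty list (types[0]); nothing else is excluded
def Pre_select_best_type_py (types : List String) : Prop := types ≠ []
instance (types : List String) : Decidable (Pre_select_best_type_py types) := by unfold Pre_select_best_type_py; infer_instance
def pvWitness_select_best_type_py : List String := ["foo", "oracle_manipulation"]

def Spec_select_best_type_py (types : List String) (out : String) : Prop := out = select_best_type_py_alt types
instance (types : List String) (out : String) : Decidable (Spec_select_best_type_py types out) := by unfold Spec_select_best_type_py; infer_instance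

-- ===== CLAIM (what is proved, stated in full; the proofs are below) =====
def Claim_equal_select_best_type_py : Prop := ∀ (types : List String), Dom_select_best_type_py types → Pre_select_best_type_py types → Spec_select_best_type_py types (select_best_type_py types)

-- ===== LEMMAS AND PROOFS =====

-- rank lookup as a plain function (proof-side only)
def pvRk (x : String) : Int :=
  if x = "initialization_frontrun_risk" then 0
  else if x = "unprotected_initialization" then 1
  else if x = "precision_loss_division" then 2
  else if x = "oracle_manipulation" then 3
  else if x = "unbounded_loop_dos" then 4
  else if x = "reentrancy_vulnerability" then 5
  else 6

lemma pvRank_eval (x : String) :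
    (((PySem.List.enumerate pvPreference).foldl (fun d p => d.insert p.2 p.1)
        PySem.Dict.empty).getD x ((pvPreference.length : Int))) = pvRk x := by
  simp [pvPreference, PySem.List.enumerate, PySem.Dict.getD, PySem.Dict.get?,
        PySem.Dict.insert, PySem.Dict.empty, PySem.Dict.contains, pvRk]
  split_ifs <;> simp_all [List.find?, beq_eq_decide, eq_comm]

lemma pvRk_nonneg (x : String) : 0 ≤ pvRk x := by
  unfold pvRk; split_ifs <;> norm_num

lemma pvRk_le_six (x : String) : pvRk x ≤ 6 := by
  unfold pvRk; split_ifs <;> norm_num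

lemma pvRk_inv (x : String) (h : pvRk x < 6) :
    x = "initialization_frontrun_risk" ∨ x = "unprotected_initialization" ∨
    x = "precision_loss_division" ∨ x = "oracle_manipulation" ∨
    x = "unbounded_loop_dos" ∨ x = "reentrancy_vulnerability" := by
  unfold pvRk at h; split_ifs at h <;> simp_all

lemma pvRk_eq0 {x : String} (h : pvRk x = 0) : x = "initialization_frontrun_risk" := by
  unfold pvRk at h; split_ifs at h <;> first | assumption | omega
lemma pvRk_eq1 {x : String} (h : pvRk x = 1) : x = "unprotected_initialization" := by
  unfold pvRk at h; split_ifs at h <;> first | assumption | omega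
lemma pvRk_eq2 {x : String} (h : pvRk x = 2) : x = "precision_loss_division" := by
  unfold pvRk at h; split_ifs at h <;> first | assumption | omega
lemma pvRk_eq3 {x : String} (h : pvRk x = 3) : x = "oracle_manipulation" := by
  unfold pvRk at h; split_ifs at h <;> first | assumption | omega
lemma pvRk_eq4 {x : String} (h : pvRk x = 4) : x = "unbounded_loop_dos" := by
  unfold pvRk at h; split_ifs at h <;> first | assumption | omega
lemma pvRk_eq5 {x : String} (h : pvRk x = 5) : x = "reentrancy_vulnerability" := by
  unfold pvRk at h; split_ifs at h <;> first | assumption | omega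

-- the running-minimum loop: its result is in b::ts, has minimal pvRk there,
-- and stays at b when everything in sight has rank 6
lemma pvFold_spec (ts : List String) (b : String) :
    (ts.foldl (fun best t => if pvRk t < pvRk best then t else best) b) ∈ b :: ts ∧
    (∀ x ∈ b :: ts, pvRk (ts.foldl (fun best t => if pvRk t < pvRk best then t else best) b) ≤ pvRk x) ∧
    ((∀ x ∈ b :: ts, pvRk x = 6) → ts.foldl (fun best t => if pvRk t < pvRk best then t else best) b = b) := by
  induction ts generalizing b with
  | nil => simp
  | cons x ts ih =>
    simp only [List.foldl_cons]
    by_cases hx : pvRk x < pvRk b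
    · rw [if_pos hx]
      obtain ⟨hmem, hmin, hall⟩ := ih x
      refine ⟨?_, ?_, ?_⟩
      · rcases List.mem_cons.1 hmem with h | h <;> simp [h]
      · intro y hy
        rcases List.mem_cons.1 hy with rfl | hy
        · have := hmin x (by simp); omega
        · exact hmin y hy
      · intro h6
        have hb6 := h6 b (by simp)
        have hx6 := h6 x (by simp)
        omega
    · rw [if_neg hx]
      obtain ⟨hmem, hmin, hall⟩ := ih b
      refine ⟨?_, ?_, ?_⟩
      · rcases List.mem_cons.1 hmem with h | h <;> simp [h]
      · intro y hy
        rcases List.mem_cons.1 hy with rfl | hy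
        · exact hmin y (by simp)
        · rcases List.mem_cons.1 hy with rfl | hy
          · have := hmin b (by simp); omega
          · exact hmin y (by simp [hy])
      · intro h6
        exact hall (by
          intro y hy
          rcases List.mem_cons.1 hy with rfl | hy
          · exact h6 y (by simp)
          · exact h6 y (by simp [hy]))

-- ===== VERDICT (by name: the statement is the Claim_ definition above) =====
theorem select_best_type_py_spec : Claim_equal_select_best_type_py := by
  intro types _ hpre
  unfold Spec_select_best_type_py select_best_type_py select_best_type_py_alt
  obtain ⟨t, ts, rfl⟩ := List.exists_cons_of_ne_nil hpre
  simp only [PySem.List.slice_from_one, List.tail_cons]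
  have hget : (PySem.List.pyGet? (t :: ts) 0).getD "" = t := by
    simp [PySem.List.pyGet?, PySem.List.pyIdx?]
  rw [hget]
  have hcong :
      ts.foldl (fun best u =>
        if ((PySem.List.enumerate pvPreference).foldl (fun d p => d.insert p.2 p.1)
              PySem.Dict.empty).getD u (pvPreference.length : Int) <
           ((PySem.List.enumerate pvPreference).foldl (fun d p => d.insert p.2 p.1)
              PySem.Dict.empty).getD best (pvPreference.length : Int) then u else best) t
      = ts.foldl (fun best u => if pvRk u < pvRk best then u else best) t := by
    apply PySem.List.foldl_congr_mem
    intro acc u _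
    rw [pvRank_eval, pvRank_eval]
  rw [hcong]
  obtain ⟨hmem, hmin, hall⟩ := pvFold_spec ts t
  set r := ts.foldl (fun best u => if pvRk u < pvRk best then u else best) t with hr
  have hrge := pvRk_nonneg r
  by_cases h0 : "initialization_frontrun_risk" ∈ t :: ts
  · simp only [pvSelGoA, pvPreference, List.contains_iff_mem, h0, if_true, decide_true]
    have hle := hmin _ h0
    have hz : pvRk r = 0 := by rw [show pvRk "initialization_frontrun_risk" = (0:Int) from by decide] at hle; omega
    exact (pvRk_eq0 hz).symm
  · by_cases h1 : "unprotected_initialization" ∈ t :: ts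
    · simp only [pvSelGoA, pvPreference, List.contains_iff_mem, h0, h1, decide_true,
        decide_false, Bool.false_eq_true, if_true, if_false]
      have hle := hmin _ h1
      have hle1 : pvRk r ≤ 1 := by rw [show pvRk "unprotected_initialization" = (1:Int) from by decide] at hle; exact hle
      have hne0 : pvRk r ≠ 0 := fun hz => h0 (pvRk_eq0 hz ▸ hmem)
      exact (pvRk_eq1 (by omega)).symm
    · by_cases h2 : "precision_loss_division" ∈ t :: ts
      · simp only [pvSelGoA, pvPreference, List.contains_iff_mem, h0, h1, h2, decide_true,
          decide_false, Bool.false_eq_true, if_true, if_false]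
        have hle := hmin _ h2
        have hle2 : pvRk r ≤ 2 := by rw [show pvRk "precision_loss_division" = (2:Int) from by decide] at hle; exact hle
        have hne0 : pvRk r ≠ 0 := fun hz => h0 (pvRk_eq0 hz ▸ hmem)
        have hne1 : pvRk r ≠ 1 := fun hz => h1 (pvRk_eq1 hz ▸ hmem)
        exact (pvRk_eq2 (by omega)).symm
      · by_cases h3 : "oracle_manipulation" ∈ t :: ts
        · simp only [pvSelGoA, pvPreference, List.contains_iff_mem, h0, h1, h2, h3, decide_true,
            decide_false, Bool.false_eq_true, if_true, if_false]
          have hle := hmin _ h3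
          have hle3 : pvRk r ≤ 3 := by rw [show pvRk "oracle_manipulation" = (3:Int) from by decide] at hle; exact hle
          have hne0 : pvRk r ≠ 0 := fun hz => h0 (pvRk_eq0 hz ▸ hmem)
          have hne1 : pvRk r ≠ 1 := fun hz => h1 (pvRk_eq1 hz ▸ hmem)
          have hne2 : pvRk r ≠ 2 := fun hz => h2 (pvRk_eq2 hz ▸ hmem)
          exact (pvRk_eq3 (by omega)).symm
        · by_cases h4 : "unbounded_loop_dos" ∈ t :: ts
          · simp only [pvSelGoA, pvPreference, List.contains_iff_mem, h0, h1, h2, h3, h4,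
              decide_true, decide_false, Bool.false_eq_true, if_true, if_false]
            have hle := hmin _ h4
            have hle4 : pvRk r ≤ 4 := by rw [show pvRk "unbounded_loop_dos" = (4:Int) from by decide] at hle; exact hle
            have hne0 : pvRk r ≠ 0 := fun hz => h0 (pvRk_eq0 hz ▸ hmem)
            have hne1 : pvRk r ≠ 1 := fun hz => h1 (pvRk_eq1 hz ▸ hmem)
            have hne2 : pvRk r ≠ 2 := fun hz => h2 (pvRk_eq2 hz ▸ hmem)
            have hne3 : pvRk r ≠ 3 := fun hz => h3 (pvRk_eq3 hz ▸ hmem)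
            exact (pvRk_eq4 (by omega)).symm
          · by_cases h5 : "reentrancy_vulnerability" ∈ t :: ts
            · simp only [pvSelGoA, pvPreference, List.contains_iff_mem, h0, h1, h2, h3, h4, h5,
                decide_true, decide_false, Bool.false_eq_true, if_true, if_false]
              have hle := hmin _ h5
              have hle5 : pvRk r ≤ 5 := by rw [show pvRk "reentrancy_vulnerability" = (5:Int) from by decide] at hle; exact hle
              have hne0 : pvRk r ≠ 0 := fun hz => h0 (pvRk_eq0 hz ▸ hmem)
              have hne1 : pvRk r ≠ 1 := fun hz => h1 (pvRk_eq1 hz ▸ hmem)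
              have hne2 : pvRk r ≠ 2 := fun hz => h2 (pvRk_eq2 hz ▸ hmem)
              have hne3 : pvRk r ≠ 3 := fun hz => h3 (pvRk_eq3 hz ▸ hmem)
              have hne4 : pvRk r ≠ 4 := fun hz => h4 (pvRk_eq4 hz ▸ hmem)
              exact (pvRk_eq5 (by omega)).symm
            · have h6 : ∀ y ∈ t :: ts, pvRk y = 6 := by
                intro y hy
                have hle := pvRk_le_six y
                by_contra hne
                rcases pvRk_inv y (by omega) with h | h | h | h | h | h <;> subst h
                · exact h0 hy
                · exact h1 hy
                · exact h2 hy
                · exact h3 hy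
                · exact h4 hy
                · exact h5 hy
              rw [hall h6]
              simp only [pvSelGoA, pvPreference, List.contains_iff_mem, h0, h1, h2, h3, h4, h5,
                decide_false, Bool.false_eq_true, if_false]
              exact hget
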